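-- pv_equiv track=rewrite | github.com/LuisReis09/APA | pyver/teste.py | arestas_para_rotas
-- ===== SOURCE A (Python) =====
-- def arestas_para_rotas(rotas_arestas):
--     rotas_ret = []
--     for rota in rotas_arestas:
--         rota_atual = [0]
--         last = 0
--         rota.sort()
--         for _ in range(len(rota) - 1):
--             for aresta in rota:
--                 if aresta[0] == last:
--                     rota_atual.append(aresta[1])
--                     last = aresta[1]
--                     break
--         rotas_ret.append(rota_atual + [0])
--
--     return rotas_ret
-- ===== SOURCE B (Python) =====
-- def arestas_para_rotas(rotas_arestas):
--     # No sorting: the first edge leaving `last` in A's sorted scan is exactly the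
--     # edge with the minimum target among edges with that source, so one unsorted
--     # pass computing the per-source minimum target suffices, then walk the chain.
--     rotas_ret = []
--     for rota in rotas_arestas:
--         succ = {}
--         for a, b in rota:
--             if a not in succ or b < succ[a]:
--                 succ[a] = b
--         path = [0]
--         last = 0
--         for _ in range(len(rota) - 1):
--             if last not in succ:
--                 break
--             last = succ[last]
--             path.append(last)
--         path.append(0)
--         rotas_ret.append(path)
--     return rotas_ret
-- ===== Notes on version B (the rewrite author's own statement) =====
-- stated objective: faster
-- what changed: B eliminates A's sort and quadratic rescans entirely: since the first edge leaving a vertex in A's lexicographically sorted list is exactly the edge with the minimum target for that source, B computes per-source minimum targets in one pass over the UNSORTED edge list and then walks the successor chain linearly.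
import Mathlib
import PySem

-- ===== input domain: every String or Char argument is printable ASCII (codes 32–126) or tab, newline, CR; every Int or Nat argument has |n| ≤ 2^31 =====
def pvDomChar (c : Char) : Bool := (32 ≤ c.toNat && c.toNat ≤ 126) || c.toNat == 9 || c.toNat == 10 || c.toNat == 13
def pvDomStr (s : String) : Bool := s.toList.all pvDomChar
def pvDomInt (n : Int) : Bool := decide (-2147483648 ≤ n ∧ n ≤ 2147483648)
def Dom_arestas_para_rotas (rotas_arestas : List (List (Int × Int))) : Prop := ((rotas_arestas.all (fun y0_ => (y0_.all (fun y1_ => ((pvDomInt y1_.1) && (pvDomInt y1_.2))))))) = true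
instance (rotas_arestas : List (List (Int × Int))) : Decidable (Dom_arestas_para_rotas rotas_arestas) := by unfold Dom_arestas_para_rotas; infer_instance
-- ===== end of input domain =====

-- B never sorts: A's "first edge leaving `last` in the sorted list" is the minimum-target
-- edge for that source, so B computes per-source minimum targets in one unsorted pass and
-- walks the chain (objective: faster). A sorts each inner list in place, B does not; the
-- equivalence proved is about the return value only.

-- ===== PORT A =====
-- inner 'for aresta in rota: if aresta[0] == last: …; break' — first edge whose source is `last`
def pvAFind (last : Int) : List (Int × Int) → Option (Int × Int)
  | [] => none
  | a :: rest => if a.1 == last then some a else pvAFind last rest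

-- one iteration of A's 'for _ in range(len(rota) - 1)' body over state (rota_atual, last)
def pvAStep (rota : List (Int × Int)) (st : List Int × Int) : List Int × Int :=
  match pvAFind st.2 rota with
  | some a => (st.1 ++ [a.2], a.2)
  | none => st

def arestas_para_rotas (rotas_arestas : List (List (Int × Int))) : List (List Int) :=
  rotas_arestas.foldl (fun rotas_ret rota =>
    rotas_ret ++
      [((List.range ((PySem.List.sorted2 rota (·.1) (·.2)).length - 1)).foldl
          (fun st _ => pvAStep (PySem.List.sorted2 rota (·.1) (·.2)) st) ([0], 0)).1 ++ [0]]) []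

-- ===== PORT B =====
-- 'for a, b in rota: if a not in succ or b < succ[a]: succ[a] = b'  (per-source minimum target)
def pvBDict : List (Int × Int) → PySem.Dict Int Int → PySem.Dict Int Int
  | [], d => d
  | p :: rest, d =>
    pvBDict rest
      (if (d.get? p.1).all (fun c => decide (p.2 < c)) then d.insert p.1 p.2 else d)

-- 'for _ in range(n): if last not in succ: break; last = succ[last]; path.append(last)'
def pvBFollow (d : PySem.Dict Int Int) : Nat → List Int → Int → List Int
  | 0, acc, _ => acc
  | n + 1, acc, last =>
    match d.get? last with
    | some v => pvBFollow d n (acc ++ [v]) v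
    | none => acc

def arestas_para_rotas_alt (rotas_arestas : List (List (Int × Int))) : List (List Int) :=
  rotas_arestas.foldl (fun rotas_ret rota =>
    rotas_ret ++
      [pvBFollow (pvBDict rota PySem.Dict.empty) (rota.length - 1) [0] 0 ++ [0]]) []

-- ===== PRECONDITION & SPEC =====
def Spec_arestas_para_rotas (rotas_arestas : List (List (Int × Int))) (out : List (List Int)) : Prop := out = arestas_para_rotas_alt rotas_arestas
instance (rotas_arestas : List (List (Int × Int))) (out : List (List Int)) : Decidable (Spec_arestas_para_rotas rotas_arestas out) := by unfold Spec_arestas_para_rotas; infer_instance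

-- ===== CLAIM (what is proved, stated in full; the proofs are below) =====
def Claim_equal_arestas_para_rotas : Prop := ∀ (rotas_arestas : List (List (Int × Int))), Dom_arestas_para_rotas rotas_arestas → Spec_arestas_para_rotas rotas_arestas (arestas_para_rotas rotas_arestas)

-- ===== LEMMAS AND PROOFS =====

-- minimum of two optional Ints (none = absent)
def pvOMin : Option Int → Option Int → Option Int
  | none, y => y
  | some a, none => some a
  | some a, some b => some (min a b)

-- specification value: minimum target among edges of l with source k
def pvMSpec (k : Int) : List (Int × Int) → Option Int
  | [] => none
  | p :: rest => if p.1 = k then pvOMin (some p.2) (pvMSpec k rest) else pvMSpec k rest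

theorem pvOMin_assoc (a b c : Option Int) : pvOMin (pvOMin a b) c = pvOMin a (pvOMin b c) := by
  cases a <;> cases b <;> cases c <;> simp [pvOMin, min_assoc]

-- effect of one B update on a lookup
theorem pvStep_get? (d : PySem.Dict Int Int) (p : Int × Int) (k : Int) :
    (if (d.get? p.1).all (fun c => decide (p.2 < c)) then d.insert p.1 p.2 else d).get? k
      = if p.1 = k then pvOMin (d.get? k) (some p.2) else d.get? k := by
  by_cases hk : p.1 = k
  · subst hk
    rw [if_pos rfl]
    cases hp : d.get? p.1 with
    | none => simp [pvOMin]
    | some c =>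
      by_cases hlt : p.2 < c
      · simp [hlt, pvOMin, min_eq_right (le_of_lt hlt)]
      · simp [hlt, pvOMin, min_eq_left (le_of_not_gt hlt), hp]
  · rw [if_neg hk]
    split
    · rw [PySem.Dict.get?_insert, if_neg (fun h => hk h.symm)]
    · rfl

-- B's fold computes pvOMin of the initial binding and the per-source minimum
theorem pvBDict_get? (l : List (Int × Int)) : ∀ (d : PySem.Dict Int Int) (k : Int),
    (pvBDict l d).get? k = pvOMin (d.get? k) (pvMSpec k l) := by
  induction l with
  | nil => intro d k; cases h : d.get? k <;> simp [pvBDict, pvMSpec, pvOMin, h]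
  | cons p rest ih =>
    intro d k
    simp only [pvBDict, pvMSpec]
    rw [ih, pvStep_get?]
    by_cases hk : p.1 = k
    · rw [if_pos hk, if_pos hk, pvOMin_assoc]
    · simp [hk]

theorem pvMSpec_none (k : Int) (l : List (Int × Int)) (h : pvMSpec k l = none) :
    ∀ b : Int, (k, b) ∉ l := by
  induction l with
  | nil => simp
  | cons p rest ih =>
    simp only [pvMSpec] at h
    by_cases hk : p.1 = k
    · rw [if_pos hk] at h
      cases hm : pvMSpec k rest <;> rw [hm] at h <;> simp [pvOMin] at h
    · rw [if_neg hk] at h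
      intro b hb
      rcases List.mem_cons.mp hb with h1 | h2
      · exact hk (congrArg Prod.fst h1).symm
      · exact ih h b h2

-- pvMSpec is characterised by membership + minimality, hence permutation-invariant
theorem pvMSpec_some (k : Int) (l : List (Int × Int)) (m : Int) (h : pvMSpec k l = some m) :
    (k, m) ∈ l ∧ ∀ b : Int, (k, b) ∈ l → m ≤ b := by
  induction l generalizing m with
  | nil => simp [pvMSpec] at h
  | cons p rest ih =>
    simp only [pvMSpec] at h
    by_cases hk : p.1 = k
    · rw [if_pos hk] at h
      have hpk : (k, p.2) = p := by rw [← hk]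
      cases hm : pvMSpec k rest with
      | none =>
        rw [hm] at h
        simp only [pvOMin, Option.some.injEq] at h
        subst h
        refine ⟨hpk ▸ List.mem_cons_self, ?_⟩
        intro b hb
        rcases List.mem_cons.mp hb with h1 | h2
        · have : b = p.2 := congrArg Prod.snd h1
          omega
        · exact absurd h2 (pvMSpec_none k rest hm b)
      | some m' =>
        rw [hm] at h
        obtain ⟨hmem', hmin'⟩ := ih m' hm
        simp only [pvOMin, Option.some.injEq] at h
        constructor
        · rcases le_total p.2 m' with hle | hle
          · rw [← h, min_eq_left hle]; exact hpk ▸ List.mem_cons_self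
          · rw [← h, min_eq_right hle]; exact List.mem_cons_of_mem _ hmem'
        · intro b hb
          rcases List.mem_cons.mp hb with h1 | h2
          · have : b = p.2 := congrArg Prod.snd h1
            have := min_le_left p.2 m'
            omega
          · have := hmin' b h2
            have := min_le_right p.2 m'
            omega
    · rw [if_neg hk] at h
      obtain ⟨hmem, hmin⟩ := ih m h
      refine ⟨List.mem_cons_of_mem _ hmem, ?_⟩
      intro b hb
      rcases List.mem_cons.mp hb with h1 | h2
      · exact absurd (congrArg Prod.fst h1).symm hk
      · exact hmin b h2

theorem pvMSpec_perm (k : Int) (l l' : List (Int × Int)) (hp : l.Perm l') :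
    pvMSpec k l = pvMSpec k l' := by
  cases h1 : pvMSpec k l with
  | none =>
    cases h2 : pvMSpec k l' with
    | none => rfl
    | some m =>
      exact absurd (hp.mem_iff.mpr (pvMSpec_some k l' m h2).1) (pvMSpec_none k l h1 m)
  | some m =>
    cases h2 : pvMSpec k l' with
    | none =>
      exact absurd (hp.mem_iff.mp (pvMSpec_some k l m h1).1) (pvMSpec_none k l' h2 m)
    | some m' =>
      obtain ⟨ha1, ha2⟩ := pvMSpec_some k l m h1
      obtain ⟨hb1, hb2⟩ := pvMSpec_some k l' m' h2
      have h3 := ha2 m' (hp.mem_iff.mpr hb1)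
      have h4 := hb2 m (hp.mem_iff.mp ha1)
      rw [le_antisymm h3 h4]

-- the comparison sorted2 uses on (Int × Int) (lexicographic strict order)
def pvBlt (a b : Int × Int) : Bool :=
  decide (a.1 < b.1) || (!decide (b.1 < a.1) && decide (a.2 < b.2))

theorem pvBlt_true (a b : Int × Int) :
    pvBlt a b = true ↔ a.1 < b.1 ∨ (a.1 ≤ b.1 ∧ a.2 < b.2) := by
  simp [pvBlt, not_lt]

theorem pvBlt_asym (a b : Int × Int) (h : pvBlt a b = true) : pvBlt b a = false := by
  rw [Bool.eq_false_iff]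
  intro h2
  rw [pvBlt_true] at h h2
  omega

theorem pvBlt_trans' (a b c : Int × Int) (h1 : pvBlt a b = true) (h2 : pvBlt c b = false) :
    pvBlt c a = false := by
  rw [Bool.eq_false_iff] at h2 ⊢
  intro h3
  apply h2
  rw [pvBlt_true] at h1 h3 ⊢
  omega

-- insertion preserves sortedness (w.r.t. "no later element strictly before an earlier one")
theorem pairwise_insertBy (x : Int × Int) (l : List (Int × Int))
    (h : l.Pairwise (fun a b => pvBlt b a = false)) :
    (PySem.List.insertBy pvBlt x l).Pairwise (fun a b => pvBlt b a = false) := by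
  induction l with
  | nil => simp [PySem.List.insertBy]
  | cons y ys ih =>
    rcases h with _ | ⟨hy, hys⟩
    by_cases hb : pvBlt x y = true
    · simp only [PySem.List.insertBy, hb, if_pos]
      refine List.Pairwise.cons ?_ (List.Pairwise.cons hy hys)
      intro z hz
      rcases List.mem_cons.mp hz with rfl | hz'
      · exact pvBlt_asym x z hb
      · exact pvBlt_trans' x y z hb (hy z hz')
    · have hb' : pvBlt x y = false := by simpa using hb
      simp only [PySem.List.insertBy, hb', Bool.false_eq_true, if_neg, not_false_iff]
      refine List.Pairwise.cons ?_ (ih hys)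
      intro z hz
      rcases (PySem.List.mem_insertBy pvBlt x z ys).mp hz with rfl | hz'
      · exact hb'
      · exact hy z hz'

theorem sorted2_pairwise (l : List (Int × Int)) :
    (PySem.List.sorted2 l (·.1) (·.2)).Pairwise (fun a b => pvBlt b a = false) := by
  show (List.foldl (fun acc x => PySem.List.insertBy pvBlt x acc) [] l).Pairwise _
  have key : ∀ (l' : List (Int × Int)) (acc : List (Int × Int)),
      acc.Pairwise (fun a b => pvBlt b a = false) →
      (List.foldl (fun acc x => PySem.List.insertBy pvBlt x acc) acc l').Pairwise
        (fun a b => pvBlt b a = false) := by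
    intro l'
    induction l' with
    | nil => intro acc h; exact h
    | cons x t ih =>
      intro acc h
      exact ih _ (pairwise_insertBy x acc h)
  exact key l [] (by simp)

-- on a lex-sorted list, the first edge with source k carries the minimum target
theorem pvAFind_eq_mspec (k : Int) (l : List (Int × Int))
    (h : l.Pairwise (fun a b => pvBlt b a = false)) :
    (pvAFind k l).map (·.2) = pvMSpec k l := by
  induction l with
  | nil => rfl
  | cons p rest ih =>
    rcases h with _ | ⟨hp, hrest⟩
    simp only [pvAFind, pvMSpec]
    by_cases hk : p.1 = k
    · rw [if_pos (by simpa using hk), if_pos hk]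
      cases hm : pvMSpec k rest with
      | none => simp [pvOMin]
      | some m =>
        obtain ⟨hmem, _⟩ := pvMSpec_some k rest m hm
        have hle := hp (k, m) hmem
        have hpm : p.2 ≤ m := by
          simp only [Bool.eq_false_iff, Ne, pvBlt_true] at hle
          simp only [not_or, not_and, not_lt] at hle
          omega
        simp [pvOMin, min_eq_left hpm]
    · rw [if_neg (by simpa using hk), if_neg hk]
      exact ih hrest

-- B's dict answers exactly A's first-match scan on the sorted list
theorem pvDict_eq_find (rota : List (Int × Int)) (k : Int) :
    (pvBDict rota PySem.Dict.empty).get? k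
      = (pvAFind k (PySem.List.sorted2 rota (·.1) (·.2))).map (·.2) := by
  rw [pvBDict_get?, PySem.Dict.get?_empty,
    pvAFind_eq_mspec k _ (sorted2_pairwise rota),
    pvMSpec_perm k _ rota (PySem.List.sorted2_perm rota (·.1) (·.2) false)]
  cases pvMSpec k rota <;> rfl

theorem pvBFollow_none (d : PySem.Dict Int Int) (last : Int) (h : d.get? last = none) :
    ∀ (n : Nat) (acc : List Int), pvBFollow d n acc last = acc := by
  intro n acc; cases n <;> simp [pvBFollow, h]

-- A's step-loop (first component) is B's chain walk
theorem loop_eq (d : PySem.Dict Int Int) (r : List (Int × Int))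
    (hd : ∀ k, d.get? k = (pvAFind k r).map (·.2)) :
    ∀ (L : List Nat) (acc : List Int) (last : Int),
      (L.foldl (fun st _ => pvAStep r st) (acc, last)).1 = pvBFollow d L.length acc last := by
  intro L
  induction L with
  | nil => intro acc last; simp [pvBFollow]
  | cons x L ih =>
    intro acc last
    rw [List.foldl_cons]
    cases hf : pvAFind last r with
    | some a =>
      have hstep : pvAStep r (acc, last) = (acc ++ [a.2], a.2) := by simp [pvAStep, hf]
      have hsome : d.get? last = some a.2 := by rw [hd, hf]; rfl
      rw [hstep, ih, List.length_cons]
      simp [pvBFollow, hsome]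
    | none =>
      have hstep : pvAStep r (acc, last) = (acc, last) := by simp [pvAStep, hf]
      have hnone : d.get? last = none := by rw [hd, hf]; rfl
      rw [hstep, ih, pvBFollow_none _ _ hnone, pvBFollow_none _ _ hnone]

-- ===== VERDICT (by name: the statement is the Claim_ definition above) =====
theorem arestas_para_rotas_spec : Claim_equal_arestas_para_rotas := by
  intro rotas _
  unfold Spec_arestas_para_rotas arestas_para_rotas arestas_para_rotas_alt
  rw [PySem.List.foldl_append_singleton_eq_map, PySem.List.foldl_append_singleton_eq_map]
  simp only [List.nil_append]
  refine List.map_congr_left (fun rota _ => ?_)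
  have h := loop_eq (pvBDict rota PySem.Dict.empty) (PySem.List.sorted2 rota (·.1) (·.2))
    (pvDict_eq_find rota)
    (List.range ((PySem.List.sorted2 rota (·.1) (·.2)).length - 1)) [0] 0
  rw [List.length_range] at h
  rw [h, (PySem.List.sorted2_perm rota (·.1) (·.2) false).length_eq]
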